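-- pv_equiv track=rewrite | github.com/Picsart-AI-Research/OpenBias | utils/utils.py | merge_in_one_cluster
-- ===== SOURCE A (Python) =====
-- from copy import deepcopy
--
-- def get_max_count(cluster_classes):
--     max_count = 0
--     max_count_class = ''
--     for c in cluster_classes:
--         if cluster_classes[c]['counts'] > max_count:
--             max_count = cluster_classes[c]['counts']
--             max_count_class = c
--     return max_count_class, max_count
--
-- def merge_in_one_cluster(
--     bias_classes_final,
--     bias_captions_final
-- ):
--     bias_classes_merged = deepcopy(bias_classes_final)
--     bias_captions_merged = deepcopy(bias_captions_final)
--     for bias_cluster in bias_classes_final: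
--         for bias in bias_classes_final[bias_cluster]:
--             # get max count class
--             max_count_class, max_counts = get_max_count(bias_classes_final[bias_cluster][bias])
--             # merge others and remove all other clusters
--             for class_cluster in bias_classes_final[bias_cluster][bias]:
--                 if class_cluster != max_count_class:
--                     bias_classes_merged[bias_cluster][bias][max_count_class]['counts'] += bias_classes_final[bias_cluster][bias][class_cluster]['counts']
--                     bias_captions_merged[bias_cluster][bias][max_count_class] += bias_captions_final[bias_cluster][bias][class_cluster]
--                     del bias_classes_merged[bias_cluster][bias][class_cluster]
--                     del bias_captions_merged[bias_cluster][bias][class_cluster]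
--     return bias_classes_merged, bias_captions_merged
-- ===== SOURCE B (Python) =====
-- from copy import deepcopy
--
-- def get_max_count(cluster_classes):
--     max_count = 0
--     max_count_class = ''
--     for c in cluster_classes:
--         if cluster_classes[c]['counts'] > max_count:
--             max_count = cluster_classes[c]['counts']
--             max_count_class = c
--     return max_count_class, max_count
--
-- def merge_in_one_cluster(bias_classes_final, bias_captions_final):
--     merged_classes = {}
--     merged_captions = deepcopy(bias_captions_final)
--     for cl, biases in bias_classes_final.items():
--         merged_biases = {}
--         for b, classes in biases.items():
--             winner, _ = get_max_count(classes)
--             losers = [c for c in classes if c != winner]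
--             if not losers:
--                 merged_biases[b] = deepcopy(classes)
--                 continue
--             merged = dict(classes[winner])
--             merged['counts'] = sum(d['counts'] for d in classes.values())
--             merged_biases[b] = {winner: merged}
--             caps = bias_captions_final[cl][b]
--             merged_caps = list(caps[winner])
--             for c in losers:
--                 merged_caps += caps[c]
--             merged_captions[cl][b] = {k: merged_caps if k == winner else list(v)
--                                       for k, v in caps.items() if k not in losers}
--         merged_classes[cl] = merged_biases
--     return merged_classes, merged_captions
-- ===== Notes on version B (the rewrite author's own statement) =====
-- stated objective: alternative
-- what changed: B never mutates or deletes inside deep copies: it builds the classes result fresh (per merged bias a single-entry dict mapping the winner class to its dict with summed counts) and, on the captions side, replaces each merged bias wholesale with a rebuilt dict (losers dropped, winner's list extended winner-first), branching on whether the bias has any loser classes; A deep-copies both inputs and then loops over every loser doing in-place '+=' updates and del on the copies. …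
import Mathlib
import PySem

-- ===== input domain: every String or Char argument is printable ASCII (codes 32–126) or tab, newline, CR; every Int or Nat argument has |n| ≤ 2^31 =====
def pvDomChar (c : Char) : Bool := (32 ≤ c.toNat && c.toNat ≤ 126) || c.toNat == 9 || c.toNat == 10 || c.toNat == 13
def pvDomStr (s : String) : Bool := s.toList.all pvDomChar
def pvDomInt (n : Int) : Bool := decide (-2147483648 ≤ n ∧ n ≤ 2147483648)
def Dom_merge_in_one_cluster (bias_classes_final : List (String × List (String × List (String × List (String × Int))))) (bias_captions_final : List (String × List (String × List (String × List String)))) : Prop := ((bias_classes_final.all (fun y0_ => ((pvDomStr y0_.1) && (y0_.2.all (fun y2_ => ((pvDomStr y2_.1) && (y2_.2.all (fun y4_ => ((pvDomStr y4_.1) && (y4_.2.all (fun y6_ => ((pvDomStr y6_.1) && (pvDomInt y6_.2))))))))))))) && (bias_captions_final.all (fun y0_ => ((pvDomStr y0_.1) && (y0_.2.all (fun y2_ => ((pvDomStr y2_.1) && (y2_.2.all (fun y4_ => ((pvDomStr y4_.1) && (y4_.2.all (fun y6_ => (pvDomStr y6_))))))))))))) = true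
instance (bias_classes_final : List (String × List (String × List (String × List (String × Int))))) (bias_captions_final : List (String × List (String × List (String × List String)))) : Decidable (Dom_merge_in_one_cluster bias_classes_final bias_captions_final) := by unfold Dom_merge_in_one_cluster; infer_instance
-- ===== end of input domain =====

-- B builds each merged bias directly (fresh single-entry classes dict with summed counts; the caption
-- dict rebuilt wholesale, losers dropped and the winner's list extended winner-first) instead of A's
-- deep-copy-then-mutate-and-delete loop (objective: alternative; neither version mutates its arguments).

-- ===== PORT A =====
-- Python dicts are ported as association lists with unique keys (uniqueness is part of Pre_ below):
-- first-match lookup, in-place update of the matching entry, deletion by filtering the key out.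
def pvGet? {α : Type} (d : List (String × α)) (k : String) : Option α :=
  (d.find? (fun p => p.1 == k)).map (·.2)

def pvGetD {α : Type} (d : List (String × α)) (k : String) (dflt : α) : α :=
  (pvGet? d k).getD dflt

def pvSet {α : Type} (d : List (String × α)) (k : String) (f : α → α) : List (String × α) :=
  d.map (fun p => if p.1 == k then (p.1, f p.2) else p)

def pvDel {α : Type} (d : List (String × α)) (k : String) : List (String × α) :=
  d.filter (fun p => p.1 != k)

-- for c in cluster_classes: cluster_classes[c] is the value of the entry being iterated (dict keys are unique)
def get_max_count (cluster_classes : List (String × List (String × Int))) : String × Int :=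
  cluster_classes.foldl
    (fun acc p => if pvGetD p.2 "counts" 0 > acc.2 then (p.1, pvGetD p.2 "counts" 0) else acc)
    ("", 0)

-- deepcopy(bias_classes_final)/deepcopy(bias_captions_final) = the lists themselves (immutable values);
-- the four mutations of one loser class are the two componentwise updates of the state pair.
def merge_in_one_cluster (bias_classes_final : List (String × List (String × List (String × List (String × Int))))) (bias_captions_final : List (String × List (String × List (String × List String)))) : (List (String × List (String × List (String × List (String × Int))))) × (List (String × List (String × List (String × List String)))) :=
  bias_classes_final.foldl
    (fun st clp =>
      clp.2.foldl
        (fun st2 bp =>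
          let w := (get_max_count bp.2).1
          bp.2.foldl
            (fun st3 cp =>
              if cp.1 ≠ w then
                (pvSet st3.1 clp.1 (fun biases => pvSet biases bp.1 (fun classes =>
                   pvDel (pvSet classes w (fun d => pvSet d "counts" (fun x => x + pvGetD cp.2 "counts" 0))) cp.1)),
                 pvSet st3.2 clp.1 (fun capb => pvSet capb bp.1 (fun capc =>
                   pvDel (pvSet capc w (fun caps => caps ++ pvGetD (pvGetD (pvGetD bias_captions_final clp.1 []) bp.1 []) cp.1 [])) cp.1)))
              else st3)
            st2)
        st)
    (bias_classes_final, bias_captions_final)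

-- ===== PORT B =====
-- d[k] = v : overwrite in place if the key exists, else append
def pvSetItem {α : Type} (d : List (String × α)) (k : String) (v : α) : List (String × α) :=
  if d.any (fun p => p.1 == k) then pvSet d k (fun _ => v) else d ++ [(k, v)]

-- B: captions start as a copy of bias_captions_final and only merged biases are replaced;
-- the classes result is built fresh, one single-entry dict per merged bias.
def merge_in_one_cluster_alt (bias_classes_final : List (String × List (String × List (String × List (String × Int))))) (bias_captions_final : List (String × List (String × List (String × List String)))) : (List (String × List (String × List (String × List (String × Int))))) × (List (String × List (String × List (String × List String)))) :=
  bias_classes_final.foldl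
    (fun st clp =>
      let inner := clp.2.foldl
        (fun (r : (List (String × List (String × List (String × Int)))) × (List (String × List (String × List (String × List String))))) bp =>
          let winner := (get_max_count bp.2).1
          let losers := (bp.2.map Prod.fst).filter (fun c => c != winner)
          if losers.isEmpty then
            (r.1 ++ [(bp.1, bp.2)], r.2)
          else
            let merged := pvSetItem (pvGetD bp.2 winner []) "counts"
                ((bp.2.map (fun cp => pvGetD cp.2 "counts" 0)).sum)
            let caps := pvGetD (pvGetD bias_captions_final clp.1 []) bp.1 []
            let merged_caps := losers.foldl (fun mc c => mc ++ pvGetD caps c []) (pvGetD caps winner [])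
            (r.1 ++ [(bp.1, [(winner, merged)])],
             pvSet r.2 clp.1 (fun capb => pvSet capb bp.1 (fun _ =>
               (caps.filter (fun kv => !(losers.contains kv.1))).map
                 (fun kv => if kv.1 == winner then (kv.1, merged_caps) else kv)))))
        ([], st.2)
      (st.1 ++ [(clp.1, inner.1)], inner.2))
    ([], bias_captions_final)

-- ===== PRECONDITION & SPEC =====
-- Pre_ = exactly the inputs on which the Python A returns normally: association lists that really
-- represent dicts (unique keys at every level of both arguments), every class dict carrying a
-- "counts" key, a findable winner for every nonempty bias (some positive count, or "" itself a
-- key), and, whenever a bias has >= 2 classes (so losers get merged), a caption entry for that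
-- cluster, that bias and every one of its class keys — otherwise the Python raises KeyError.
def pvKeysNodup {α : Type} (d : List (String × α)) : Bool :=
  decide ((d.map (·.1)).Nodup)

def preClass (cp : String × List (String × Int)) : Bool :=
  pvKeysNodup cp.2 && cp.2.any (fun q => q.1 == "counts")

def preBias (bias_captions_final : List (String × List (String × List (String × List String)))) (cl : String) (bp : String × List (String × List (String × Int))) : Bool :=
  pvKeysNodup bp.2 && bp.2.all preClass &&
  (bp.2.isEmpty || bp.2.any (fun cp => decide (0 < pvGetD cp.2 "counts" 0)) || bp.2.any (fun cp => cp.1 == "")) &&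
  (decide (bp.2.length ≤ 1) ||
    (match pvGet? bias_captions_final cl with
     | some capb =>
       match pvGet? capb bp.1 with
       | some capc => bp.2.all (fun cp => (capc.map (·.1)).contains cp.1)
       | none => false
     | none => false))

def Pre_merge_in_one_cluster (bias_classes_final : List (String × List (String × List (String × List (String × Int))))) (bias_captions_final : List (String × List (String × List (String × List String)))) : Prop :=
  pvKeysNodup bias_classes_final = true ∧
  pvKeysNodup bias_captions_final = true ∧
  bias_captions_final.all (fun clp => pvKeysNodup clp.2 && clp.2.all (fun bp => pvKeysNodup bp.2)) = true ∧
  bias_classes_final.all (fun clp => pvKeysNodup clp.2 && clp.2.all (fun bp => preBias bias_captions_final clp.1 bp)) = true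

instance (bias_classes_final : List (String × List (String × List (String × List (String × Int))))) (bias_captions_final : List (String × List (String × List (String × List String)))) : Decidable (Pre_merge_in_one_cluster bias_classes_final bias_captions_final) := by
  unfold Pre_merge_in_one_cluster; infer_instance

def pvWitness_merge_in_one_cluster : (List (String × List (String × List (String × List (String × Int))))) × (List (String × List (String × List (String × List String)))) :=
  ([("cl", [("b", [("x", [("counts", 2)]), ("y", [("counts", 1)])])])],
   [("cl", [("b", [("x", ["u"]), ("y", ["v"])])])])

def Spec_merge_in_one_cluster (bias_classes_final : List (String × List (String × List (String × List (String × Int))))) (bias_captions_final : List (String × List (String × List (String × List String)))) (out : (List (String × List (String × List (String × List (String × Int))))) × (List (String × List (String × List (String × List String))))) : Prop := out = merge_in_one_cluster_alt bias_classes_final bias_captions_final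
instance (bias_classes_final : List (String × List (String × List (String × List (String × Int))))) (bias_captions_final : List (String × List (String × List (String × List String)))) (out : (List (String × List (String × List (String × List (String × Int))))) × (List (String × List (String × List (String × List String))))) : Decidable (Spec_merge_in_one_cluster bias_classes_final bias_captions_final out) := by
  unfold Spec_merge_in_one_cluster
  letI d1 : DecidableEq (List (String × Int)) := instDecidableEqList
  letI d2 : DecidableEq (List (String × List (String × Int))) := @instDecidableEqList _ (@instDecidableEqProd _ _ _ d1)
  letI d3 : DecidableEq (List (String × List (String × List (String × Int)))) := @instDecidableEqList _ (@instDecidableEqProd _ _ _ d2)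
  letI d4 : DecidableEq (List (String × List (String × List (String × List (String × Int))))) := @instDecidableEqList _ (@instDecidableEqProd _ _ _ d3)
  letI e1 : DecidableEq (List (String × List String)) := instDecidableEqList
  letI e2 : DecidableEq (List (String × List (String × List String))) := @instDecidableEqList _ (@instDecidableEqProd _ _ _ e1)
  letI e3 : DecidableEq (List (String × List (String × List (String × List String)))) := @instDecidableEqList _ (@instDecidableEqProd _ _ _ e2)
  exact decidable_of_iff (out.1 = (merge_in_one_cluster_alt bias_classes_final bias_captions_final).1 ∧ out.2 = (merge_in_one_cluster_alt bias_classes_final bias_captions_final).2) (Prod.ext_iff).symm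

-- ===== CLAIM (what is proved, stated in full; the proofs are below) =====
def Claim_equal_merge_in_one_cluster : Prop := ∀ (bias_classes_final : List (String × List (String × List (String × List (String × Int))))) (bias_captions_final : List (String × List (String × List (String × List String)))), Dom_merge_in_one_cluster bias_classes_final bias_captions_final → Pre_merge_in_one_cluster bias_classes_final bias_captions_final → Spec_merge_in_one_cluster bias_classes_final bias_captions_final (merge_in_one_cluster bias_classes_final bias_captions_final)

-- ===== LEMMAS AND PROOFS =====

theorem pvSet_id {α : Type} (d : List (String × α)) (k : String) :
    pvSet d k (fun x => x) = d := by
  simp [pvSet]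

theorem pvSet_pvSet {α : Type} (d : List (String × α)) (k : String) (f g : α → α) :
    pvSet (pvSet d k f) k g = pvSet d k (fun x => g (f x)) := by
  simp only [pvSet, List.map_map]
  refine List.map_congr_left (fun p _ => ?_)
  by_cases h : p.1 = k <;> simp [h]

theorem find?_self {α : Type} {d : List (String × α)} (hnd : (d.map (·.1)).Nodup)
    {p : String × α} (hp : p ∈ d) :
    d.find? (fun q => q.1 == p.1) = some p := by
  induction d with
  | nil => cases hp
  | cons q d ih =>
    simp only [List.map_cons, List.nodup_cons] at hnd
    rcases List.mem_cons.mp hp with rfl | hp'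
    · exact List.find?_cons_of_pos (by simp)
    · have hne : q.1 ≠ p.1 := by
        intro h
        exact hnd.1 (h ▸ List.mem_map_of_mem hp')
      rw [List.find?_cons_of_neg (by simpa using hne)]
      exact ih hnd.2 hp'

theorem pvGetD_self {α : Type} {d : List (String × α)} (hnd : (d.map (·.1)).Nodup)
    {p : String × α} (hp : p ∈ d) (dflt : α) :
    pvGetD d p.1 dflt = p.2 := by
  simp [pvGetD, pvGet?, find?_self hnd hp]

-- collapse a fold that only updates the entry at one fixed key
theorem foldl_pvSet_collapse {α β : Type} (l : List β) (k : String) (G : β → α → α)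
    (s : List (String × α)) :
    l.foldl (fun s x => pvSet s k (G x)) s
      = pvSet s k (fun v => l.foldl (fun v x => G x v) v) := by
  induction l generalizing s with
  | nil => simp [pvSet_id]
  | cons x l ih =>
    simp only [List.foldl_cons]
    rw [ih, pvSet_pvSet]

-- a fold of per-key updates over a key-nodup list acts entrywise
theorem foldl_pvSet_map {α β : Type} (l : List β) (key : β → String) (F : β → α → α)
    (s : List (String × α)) (hnd : (l.map key).Nodup) :
    l.foldl (fun s q => pvSet s (key q) (F q)) s
      = s.map (fun p => match l.find? (fun q => key q == p.1) with
          | some q => (p.1, F q p.2)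
          | none => p) := by
  induction l generalizing s with
  | nil => simp
  | cons q l ih =>
    simp only [List.map_cons, List.nodup_cons] at hnd
    simp only [List.foldl_cons]
    rw [ih _ hnd.2]
    simp only [pvSet, List.map_map]
    refine List.map_congr_left (fun p _ => ?_)
    by_cases h : p.1 = key q
    · have hnone : l.find? (fun r => key r == key q) = none := by
        rw [List.find?_eq_none]
        intro r hr
        simp only [beq_iff_eq]
        intro hk
        exact hnd.1 (hk ▸ List.mem_map_of_mem hr)
      simp [h, hnone]
    · simp [h, Ne.symm h]

theorem filter_pvSet {α : Type} (s : List (String × α)) (k : String) (f : α → α)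
    (P : String → Bool) :
    (pvSet s k f).filter (fun p => P p.1) = pvSet (s.filter (fun p => P p.1)) k f := by
  induction s with
  | nil => rfl
  | cons p s ih =>
    simp only [pvSet, List.map_cons, List.filter_cons] at ih ⊢
    by_cases hk : p.1 = k
    · simp only [← hk, beq_self_eq_true, if_true] at ih ⊢
      by_cases hP : P p.1 <;> simp [hP] <;> simpa using ih
    · by_cases hP : P p.1 <;> simp [hk, hP] <;> simpa using ih

-- the loser loop of A: delete every non-winner key, fold their contributions into the winner entry
theorem foldl_del_set {α σ : Type} (w : String) (key : σ → String) (upd : σ → α → α)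
    (cs : List σ) (s : List (String × α)) :
    cs.foldl (fun s c => if key c ≠ w then pvDel (pvSet s w (upd c)) (key c) else s) s
      = pvSet (s.filter (fun p => !((cs.filter (fun c => key c != w)).any (fun c => key c == p.1)))) w
          (fun v => (cs.filter (fun c => key c != w)).foldl (fun v c => upd c v) v) := by
  induction cs generalizing s with
  | nil => simp [pvSet_id]
  | cons c cs ih =>
    by_cases hc : key c = w
    · rw [List.foldl_cons, if_neg (by simp [hc])]
      rw [show (c :: cs).filter (fun c => key c != w) = cs.filter (fun c => key c != w) from by
        simp [hc]]
      exact ih s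
    · rw [List.foldl_cons, if_pos (by exact hc)]
      rw [ih]
      have hsplit : (c :: cs).filter (fun c => key c != w) = c :: cs.filter (fun c => key c != w) := by
        simp [hc]
      have hfil :
          (pvDel (pvSet s w (upd c)) (key c)).filter
              (fun p => !((cs.filter (fun c => key c != w)).any (fun c => key c == p.1)))
            = pvSet (s.filter (fun p =>
                !(((c :: cs).filter (fun c => key c != w)).any (fun c => key c == p.1)))) w (upd c) := by
        simp only [pvDel, List.filter_filter]
        rw [filter_pvSet s w (upd c)
          (fun x => (!((cs.filter (fun c => key c != w)).any (fun c => key c == x))) && (x != key c))]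
        congr 1
        refine List.filter_congr (fun p _ => ?_)
        rw [hsplit]
        simp only [List.any_cons, Bool.not_or]
        by_cases h1 : key c = p.1
        · simp [h1, Bool.and_comm]
        · have h2 : ¬ p.1 = key c := fun h => h1 h.symm
          have e1 : (p.1 != key c) = true := by simp [bne_iff_ne, h2]
          have e2 : (key c == p.1) = false := by simp [h1]
          rw [e1, e2]
          simp
      rw [hfil, pvSet_pvSet, hsplit]
      simp

-- get_max_count: the result is either the start accumulator or (key, counts) of some member with a larger count
theorem gmc_fold_cases (cs : List (String × List (String × Int))) :
    ∀ acc, (cs.foldl (fun acc p => if pvGetD p.2 "counts" 0 > acc.2 then (p.1, pvGetD p.2 "counts" 0) else acc) acc) = acc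
      ∨ ∃ p ∈ cs, (cs.foldl (fun acc p => if pvGetD p.2 "counts" 0 > acc.2 then (p.1, pvGetD p.2 "counts" 0) else acc) acc)
          = (p.1, pvGetD p.2 "counts" 0) := by
  induction cs with
  | nil => intro acc; left; rfl
  | cons p cs ih =>
    intro acc
    simp only [List.foldl_cons]
    by_cases h : pvGetD p.2 "counts" 0 > acc.2
    · rw [if_pos h]
      rcases ih (p.1, pvGetD p.2 "counts" 0) with h1 | ⟨q, hq, h1⟩
      · right; exact ⟨p, List.mem_cons_self .., h1⟩
      · right; exact ⟨q, List.mem_cons_of_mem _ hq, h1⟩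
    · rw [if_neg h]
      rcases ih acc with h1 | ⟨q, hq, h1⟩
      · left; exact h1
      · right; exact ⟨q, List.mem_cons_of_mem _ hq, h1⟩

theorem gmc_fold_acc_le (cs : List (String × List (String × Int))) :
    ∀ acc, acc.2 ≤ (cs.foldl (fun acc p => if pvGetD p.2 "counts" 0 > acc.2 then (p.1, pvGetD p.2 "counts" 0) else acc) acc).2 := by
  induction cs with
  | nil => intro acc; exact le_refl _
  | cons p cs ih =>
    intro acc
    simp only [List.foldl_cons]
    by_cases h : pvGetD p.2 "counts" 0 > acc.2
    · rw [if_pos h]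
      exact le_trans (le_of_lt h) (ih _)
    · rw [if_neg h]
      exact ih acc

theorem gmc_fold_le (cs : List (String × List (String × Int))) :
    ∀ acc, ∀ p ∈ cs, pvGetD p.2 "counts" 0
      ≤ (cs.foldl (fun acc p => if pvGetD p.2 "counts" 0 > acc.2 then (p.1, pvGetD p.2 "counts" 0) else acc) acc).2 := by
  induction cs with
  | nil => intro acc p hp; cases hp
  | cons q cs ih =>
    intro acc p hp
    simp only [List.foldl_cons]
    rcases List.mem_cons.mp hp with rfl | hp'
    · by_cases h : pvGetD p.2 "counts" 0 > acc.2
      · rw [if_pos h]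
        have := gmc_fold_acc_le cs (p.1, pvGetD p.2 "counts" 0)
        simpa using this
      · rw [if_neg h]
        exact le_trans (le_of_not_gt h) (gmc_fold_acc_le cs acc)
    · by_cases h : pvGetD q.2 "counts" 0 > acc.2 <;> [rw [if_pos h]; rw [if_neg h]] <;> exact ih _ p hp'

theorem gmc_mem (cs : List (String × List (String × Int)))
    (h : (∃ cp ∈ cs, 0 < pvGetD cp.2 "counts" 0) ∨ "" ∈ cs.map (·.1)) :
    (get_max_count cs).1 ∈ cs.map (·.1) := by
  unfold get_max_count
  rcases gmc_fold_cases cs ("", 0) with hcase | ⟨p, hp, hcase⟩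
  · rcases h with ⟨cp, hcp, hpos⟩ | hmem
    · exfalso
      have := gmc_fold_le cs ("", 0) cp hcp
      rw [hcase] at this
      simp at this
      omega
    · rw [hcase]
      exact hmem
  · rw [hcase]
    exact List.mem_map_of_mem (f := (·.1)) hp

theorem sum_filter_split (cs : List (String × List (String × Int))) (w : String) :
    ((cs.filter (fun p => p.1 == w)).map (fun cp => pvGetD cp.2 "counts" 0)).sum
      + ((cs.filter (fun p => p.1 != w)).map (fun cp => pvGetD cp.2 "counts" 0)).sum
      = (cs.map (fun cp => pvGetD cp.2 "counts" 0)).sum := by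
  induction cs with
  | nil => rfl
  | cons p cs ih =>
    by_cases h : p.1 = w <;> simp [h, ← ih] <;> ring

theorem filter_eq_singleton {α : Type} {cls : List (String × α)} (hnd : (cls.map (·.1)).Nodup)
    {w : String} {d0 : α} (hm : (w, d0) ∈ cls) :
    cls.filter (fun p => p.1 == w) = [(w, d0)] := by
  induction cls with
  | nil => cases hm
  | cons p cls ih =>
    simp only [List.map_cons, List.nodup_cons] at hnd
    rcases List.mem_cons.mp hm with rfl | hm2
    · have hnil : cls.filter (fun p => p.1 == w) = [] := by
        rw [List.filter_eq_nil_iff]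
        intro q hq
        simp only [beq_iff_eq]
        intro hk
        exact hnd.1 (hk ▸ List.mem_map_of_mem (f := (·.1)) hq)
      simp [hnil]
    · have hne : p.1 ≠ w := by
        intro h; exact hnd.1 (h ▸ List.mem_map_of_mem hm2 (f := (·.1)))
      rw [List.filter_cons, if_neg (by simpa using hne)]
      exact ih hnd.2 hm2

theorem pvSet_congr {α : Type} (d : List (String × α)) (k : String) (f g : α → α)
    (h : ∀ p ∈ d, p.1 = k → f p.2 = g p.2) :
    pvSet d k f = pvSet d k g := by
  simp only [pvSet]
  refine List.map_congr_left (fun p hp => ?_)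
  by_cases hk : p.1 = k <;> simp [hk, h p hp]

-- classes side: A's loser loop over one bias equals B's fresh single-entry dict
theorem classes_core (classes : List (String × List (String × Int)))
    (hnd : (classes.map (·.1)).Nodup)
    (hcnt : ∀ cp ∈ classes, (cp.2.map (·.1)).Nodup ∧ "counts" ∈ cp.2.map (·.1))
    (hwin : classes ≠ [] → (∃ cp ∈ classes, 0 < pvGetD cp.2 "counts" 0) ∨ "" ∈ classes.map (·.1)) :
    (classes.foldl
      (fun cls cp => if cp.1 ≠ (get_max_count classes).1 then
          pvDel (pvSet cls (get_max_count classes).1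
            (fun d => pvSet d "counts" (fun x => x + pvGetD cp.2 "counts" 0))) cp.1
        else cls) classes)
    = (if classes.isEmpty then []
       else [((get_max_count classes).1,
              pvSetItem (pvGetD classes (get_max_count classes).1 [])
                "counts" ((classes.map (fun cp => pvGetD cp.2 "counts" 0)).sum))]) := by
  by_cases hne : classes = []
  · subst hne; rfl
  · rw [if_neg (by simp [hne])]
    have hw : (get_max_count classes).1 ∈ classes.map (·.1) := gmc_mem classes (hwin hne)
    obtain ⟨p0, hp0, hkey⟩ := List.mem_map.mp hw
    have hmem : ((get_max_count classes).1, p0.2) ∈ classes := by rw [← hkey]; exact hp0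
    rw [foldl_del_set (get_max_count classes).1 (·.1)
      (fun cp => fun d => pvSet d "counts" (fun x => x + pvGetD cp.2 "counts" 0)) classes classes]
    have hfeq : classes.filter
          (fun p => !((classes.filter (fun c => c.1 != (get_max_count classes).1)).any (fun c => c.1 == p.1)))
        = classes.filter (fun p => p.1 == (get_max_count classes).1) := by
      refine List.filter_congr (fun p hp => ?_)
      by_cases hpw : p.1 = (get_max_count classes).1
      · have hfalse : (classes.filter (fun c => c.1 != (get_max_count classes).1)).any (fun c => c.1 == p.1) = false := by
          simp only [List.any_eq_false, List.mem_filter]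
          rintro c ⟨_, hcw⟩
          simp only [bne_iff_ne, ne_eq] at hcw
          simp only [beq_iff_eq]
          intro hcp
          exact hcw (hcp.trans hpw)
        simp [hpw]
      · have htrue : (classes.filter (fun c => c.1 != (get_max_count classes).1)).any (fun c => c.1 == p.1) = true := by
          rw [List.any_eq_true]
          exact ⟨p, List.mem_filter.mpr ⟨hp, by simp [bne_iff_ne, hpw]⟩, by simp⟩
        simp [htrue, hpw]
    rw [hfeq, filter_eq_singleton hnd hmem]
    have hset : pvSet [((get_max_count classes).1, p0.2)] (get_max_count classes).1
        (fun v => (classes.filter (fun c => c.1 != (get_max_count classes).1)).foldl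
          (fun v cp => pvSet v "counts" (fun x => x + pvGetD cp.2 "counts" 0)) v)
        = [((get_max_count classes).1,
            (classes.filter (fun c => c.1 != (get_max_count classes).1)).foldl
              (fun v cp => pvSet v "counts" (fun x => x + pvGetD cp.2 "counts" 0)) p0.2)] := by
      simp [pvSet]
    rw [hset, foldl_pvSet_collapse]
    have hget : pvGetD classes (get_max_count classes).1 [] = p0.2 :=
      pvGetD_self hnd hmem []
    rw [hget]
    have hcw := hcnt p0 hp0
    have hany : p0.2.any (fun p => p.1 == "counts") = true := by
      rw [List.any_eq_true]
      obtain ⟨q, hq, hq1⟩ := List.mem_map.mp hcw.2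
      exact ⟨q, hq, by simp [hq1]⟩
    rw [pvSetItem, if_pos hany]
    have hfun : pvSet p0.2 "counts" (fun v =>
        List.foldl (fun v x => v + pvGetD x.2 "counts" 0) v
          (List.filter (fun c => c.1 != (get_max_count classes).1) classes))
      = pvSet p0.2 "counts" (fun _ => (List.map (fun cp => pvGetD cp.2 "counts" 0) classes).sum) := by
      refine pvSet_congr _ _ _ _ (fun q hq hq1 => ?_)
      rw [PySem.List.foldl_add]
      have hvq : pvGetD p0.2 "counts" 0 = q.2 := by
        have := pvGetD_self hcw.1 hq (0 : Int)
        rw [hq1] at this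
        exact this
      have hsplit := sum_filter_split classes (get_max_count classes).1
      rw [filter_eq_singleton hnd hmem] at hsplit
      simp only [List.map_cons, List.map_nil, List.sum_cons, List.sum_nil] at hsplit
      omega
    rw [hfun]

theorem foldl_pair_if {σ₁ σ₂ γ : Type} (cond : γ → Prop) [DecidablePred cond]
    (f : γ → σ₁ → σ₁) (g : γ → σ₂ → σ₂) (l : List γ) (init : σ₁ × σ₂) :
    l.foldl (fun st x => if cond x then (f x st.1, g x st.2) else st) init
      = (l.foldl (fun a x => if cond x then f x a else a) init.1,
         l.foldl (fun b x => if cond x then g x b else b) init.2) := by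
  induction l generalizing init with
  | nil => rfl
  | cons x l ih =>
    by_cases h : cond x <;> simp [h, ih]

theorem if_pvSet {α : Type} (c : Prop) [Decidable c] (s : List (String × α)) (k : String)
    (f : α → α) :
    (if c then pvSet s k f else s) = pvSet s k (fun v => if c then f v else v) := by
  by_cases h : c <;> simp [h, pvSet_id]

-- A's nested fold at one bias, componentwise and with all updates collapsed to one pvSet
theorem lvl_bias (bcap : List (String × List (String × List (String × List String))))
    (clp : String × List (String × List (String × List (String × Int))))
    (bp : String × List (String × List (String × Int)))
    (st2 : (List (String × List (String × List (String × List (String × Int))))) × (List (String × List (String × List (String × List String))))) :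
    (bp.2.foldl (fun st3 cp =>
        if cp.1 ≠ (get_max_count bp.2).1 then
          (pvSet st3.1 clp.1 (fun biases => pvSet biases bp.1 (fun classes =>
             pvDel (pvSet classes (get_max_count bp.2).1
               (fun d => pvSet d "counts" (fun x => x + pvGetD cp.2 "counts" 0))) cp.1)),
           pvSet st3.2 clp.1 (fun capb => pvSet capb bp.1 (fun capc =>
             pvDel (pvSet capc (get_max_count bp.2).1
               (fun caps => caps ++ pvGetD (pvGetD (pvGetD bcap clp.1 []) bp.1 []) cp.1 [])) cp.1)))
        else st3) st2)
    = (pvSet st2.1 clp.1 (fun biases => pvSet biases bp.1 (fun cls =>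
         bp.2.foldl (fun cls cp => if cp.1 ≠ (get_max_count bp.2).1 then
           pvDel (pvSet cls (get_max_count bp.2).1
             (fun d => pvSet d "counts" (fun x => x + pvGetD cp.2 "counts" 0))) cp.1
           else cls) cls)),
       pvSet st2.2 clp.1 (fun capb => pvSet capb bp.1 (fun capc =>
         bp.2.foldl (fun capc cp => if cp.1 ≠ (get_max_count bp.2).1 then
           pvDel (pvSet capc (get_max_count bp.2).1
             (fun caps => caps ++ pvGetD (pvGetD (pvGetD bcap clp.1 []) bp.1 []) cp.1 [])) cp.1
           else capc) capc))) := by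
  rw [foldl_pair_if (cond := fun cp => cp.1 ≠ (get_max_count bp.2).1)
      (f := fun cp a => pvSet a clp.1 (fun biases => pvSet biases bp.1 (fun classes =>
             pvDel (pvSet classes (get_max_count bp.2).1
               (fun d => pvSet d "counts" (fun x => x + pvGetD cp.2 "counts" 0))) cp.1)))
      (g := fun cp b => pvSet b clp.1 (fun capb => pvSet capb bp.1 (fun capc =>
             pvDel (pvSet capc (get_max_count bp.2).1
               (fun caps => caps ++ pvGetD (pvGetD (pvGetD bcap clp.1 []) bp.1 []) cp.1 [])) cp.1)))
      bp.2 st2]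
  refine Prod.ext ?_ ?_
  · calc bp.2.foldl (fun a cp => if cp.1 ≠ (get_max_count bp.2).1 then
           pvSet a clp.1 (fun biases => pvSet biases bp.1 (fun classes =>
             pvDel (pvSet classes (get_max_count bp.2).1
               (fun d => pvSet d "counts" (fun x => x + pvGetD cp.2 "counts" 0))) cp.1)) else a) st2.1
        = bp.2.foldl (fun a cp => pvSet a clp.1 (fun v => pvSet v bp.1 (fun cls =>
            if cp.1 ≠ (get_max_count bp.2).1 then
              pvDel (pvSet cls (get_max_count bp.2).1
                (fun d => pvSet d "counts" (fun x => x + pvGetD cp.2 "counts" 0))) cp.1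
            else cls))) st2.1 := by
          refine PySem.List.foldl_congr_mem _ _ _ _ (fun a cp _ => ?_)
          rw [if_pvSet]
          exact congrArg (pvSet a clp.1) (funext fun v => if_pvSet _ v bp.1 _)
      _ = _ := by
          rw [foldl_pvSet_collapse]
          exact congrArg (pvSet st2.1 clp.1) (funext fun v => foldl_pvSet_collapse _ bp.1 _ v)
  · calc bp.2.foldl (fun b cp => if cp.1 ≠ (get_max_count bp.2).1 then
           pvSet b clp.1 (fun capb => pvSet capb bp.1 (fun capc =>
             pvDel (pvSet capc (get_max_count bp.2).1
               (fun caps => caps ++ pvGetD (pvGetD (pvGetD bcap clp.1 []) bp.1 []) cp.1 [])) cp.1)) else b) st2.2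
        = bp.2.foldl (fun b cp => pvSet b clp.1 (fun v => pvSet v bp.1 (fun capc =>
            if cp.1 ≠ (get_max_count bp.2).1 then
              pvDel (pvSet capc (get_max_count bp.2).1
                (fun caps => caps ++ pvGetD (pvGetD (pvGetD bcap clp.1 []) bp.1 []) cp.1 [])) cp.1
            else capc))) st2.2 := by
          refine PySem.List.foldl_congr_mem _ _ _ _ (fun b cp _ => ?_)
          rw [if_pvSet]
          exact congrArg (pvSet b clp.1) (funext fun v => if_pvSet _ v bp.1 _)
      _ = _ := by
          rw [foldl_pvSet_collapse]
          exact congrArg (pvSet st2.2 clp.1) (funext fun v => foldl_pvSet_collapse _ bp.1 _ v)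

-- A's nested fold, split into its two independent components with all state updates
-- collapsed to one pvSet per cluster
theorem a_split (bcf : List (String × List (String × List (String × List (String × Int))))) (bcap : List (String × List (String × List (String × List String)))) :
    merge_in_one_cluster bcf bcap =
      (bcf.foldl (fun s clp => pvSet s clp.1 (fun biases =>
          clp.2.foldl (fun bs bp => pvSet bs bp.1 (fun cls =>
            bp.2.foldl (fun cls cp => if cp.1 ≠ (get_max_count bp.2).1 then
              pvDel (pvSet cls (get_max_count bp.2).1
                (fun d => pvSet d "counts" (fun x => x + pvGetD cp.2 "counts" 0))) cp.1
              else cls) cls)) biases)) bcf,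
       bcf.foldl (fun s clp => pvSet s clp.1 (fun capb =>
          clp.2.foldl (fun bs bp => pvSet bs bp.1 (fun capc =>
            bp.2.foldl (fun capc cp => if cp.1 ≠ (get_max_count bp.2).1 then
              pvDel (pvSet capc (get_max_count bp.2).1
                (fun caps => caps ++ pvGetD (pvGetD (pvGetD bcap clp.1 []) bp.1 []) cp.1 [])) cp.1
              else capc) capc)) capb)) bcap) := by
  rw [merge_in_one_cluster]
  have hcl : ∀ (st : (List (String × List (String × List (String × List (String × Int))))) × (List (String × List (String × List (String × List String)))))
      (clp : String × List (String × List (String × List (String × Int)))),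
      (clp.2.foldl (fun st2 bp =>
        bp.2.foldl (fun st3 cp =>
          if cp.1 ≠ (get_max_count bp.2).1 then
            (pvSet st3.1 clp.1 (fun biases => pvSet biases bp.1 (fun classes =>
               pvDel (pvSet classes (get_max_count bp.2).1
                 (fun d => pvSet d "counts" (fun x => x + pvGetD cp.2 "counts" 0))) cp.1)),
             pvSet st3.2 clp.1 (fun capb => pvSet capb bp.1 (fun capc =>
               pvDel (pvSet capc (get_max_count bp.2).1
                 (fun caps => caps ++ pvGetD (pvGetD (pvGetD bcap clp.1 []) bp.1 []) cp.1 [])) cp.1)))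
          else st3) st2) st)
      = (pvSet st.1 clp.1 (fun biases =>
           clp.2.foldl (fun bs bp => pvSet bs bp.1 (fun cls =>
             bp.2.foldl (fun cls cp => if cp.1 ≠ (get_max_count bp.2).1 then
               pvDel (pvSet cls (get_max_count bp.2).1
                 (fun d => pvSet d "counts" (fun x => x + pvGetD cp.2 "counts" 0))) cp.1
               else cls) cls)) biases),
         pvSet st.2 clp.1 (fun capb =>
           clp.2.foldl (fun bs bp => pvSet bs bp.1 (fun capc =>
             bp.2.foldl (fun capc cp => if cp.1 ≠ (get_max_count bp.2).1 then
               pvDel (pvSet capc (get_max_count bp.2).1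
                 (fun caps => caps ++ pvGetD (pvGetD (pvGetD bcap clp.1 []) bp.1 []) cp.1 [])) cp.1
               else capc) capc)) capb)) := by
    intro st clp
    calc _ = clp.2.foldl (fun st2 bp =>
          (pvSet st2.1 clp.1 (fun biases => pvSet biases bp.1 (fun cls =>
             bp.2.foldl (fun cls cp => if cp.1 ≠ (get_max_count bp.2).1 then
               pvDel (pvSet cls (get_max_count bp.2).1
                 (fun d => pvSet d "counts" (fun x => x + pvGetD cp.2 "counts" 0))) cp.1
               else cls) cls)),
           pvSet st2.2 clp.1 (fun capb => pvSet capb bp.1 (fun capc =>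
             bp.2.foldl (fun capc cp => if cp.1 ≠ (get_max_count bp.2).1 then
               pvDel (pvSet capc (get_max_count bp.2).1
                 (fun caps => caps ++ pvGetD (pvGetD (pvGetD bcap clp.1 []) bp.1 []) cp.1 [])) cp.1
               else capc) capc)))) st :=
        PySem.List.foldl_congr_mem _ _ _ _ (fun st2 bp _ => lvl_bias bcap clp bp st2)
      _ = _ := by
        rw [PySem.List.foldl_prod_mk
          (fun a bp => pvSet a clp.1 (fun biases => pvSet biases bp.1 (fun cls =>
             bp.2.foldl (fun cls cp => if cp.1 ≠ (get_max_count bp.2).1 then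
               pvDel (pvSet cls (get_max_count bp.2).1
                 (fun d => pvSet d "counts" (fun x => x + pvGetD cp.2 "counts" 0))) cp.1
               else cls) cls)))
          (fun b bp => pvSet b clp.1 (fun capb => pvSet capb bp.1 (fun capc =>
             bp.2.foldl (fun capc cp => if cp.1 ≠ (get_max_count bp.2).1 then
               pvDel (pvSet capc (get_max_count bp.2).1
                 (fun caps => caps ++ pvGetD (pvGetD (pvGetD bcap clp.1 []) bp.1 []) cp.1 [])) cp.1
               else capc) capc)))
          clp.2 st.1 st.2]
        refine congrArg₂ Prod.mk ?_ ?_ <;> rw [foldl_pvSet_collapse]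
  calc _ = bcf.foldl (fun st clp =>
        (pvSet st.1 clp.1 (fun biases =>
           clp.2.foldl (fun bs bp => pvSet bs bp.1 (fun cls =>
             bp.2.foldl (fun cls cp => if cp.1 ≠ (get_max_count bp.2).1 then
               pvDel (pvSet cls (get_max_count bp.2).1
                 (fun d => pvSet d "counts" (fun x => x + pvGetD cp.2 "counts" 0))) cp.1
               else cls) cls)) biases),
         pvSet st.2 clp.1 (fun capb =>
           clp.2.foldl (fun bs bp => pvSet bs bp.1 (fun capc =>
             bp.2.foldl (fun capc cp => if cp.1 ≠ (get_max_count bp.2).1 then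
               pvDel (pvSet capc (get_max_count bp.2).1
                 (fun caps => caps ++ pvGetD (pvGetD (pvGetD bcap clp.1 []) bp.1 []) cp.1 [])) cp.1
               else capc) capc)) capb))) (bcf, bcap) :=
      PySem.List.foldl_congr_mem _ _ _ _ (fun st clp _ => hcl st clp)
    _ = _ :=
      PySem.List.foldl_prod_mk
        (fun s clp => pvSet s clp.1 (fun biases =>
          clp.2.foldl (fun bs bp => pvSet bs bp.1 (fun cls =>
            bp.2.foldl (fun cls cp => if cp.1 ≠ (get_max_count bp.2).1 then
              pvDel (pvSet cls (get_max_count bp.2).1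
                (fun d => pvSet d "counts" (fun x => x + pvGetD cp.2 "counts" 0))) cp.1
              else cls) cls)) biases))
        (fun s clp => pvSet s clp.1 (fun capb =>
          clp.2.foldl (fun bs bp => pvSet bs bp.1 (fun capc =>
            bp.2.foldl (fun capc cp => if cp.1 ≠ (get_max_count bp.2).1 then
              pvDel (pvSet capc (get_max_count bp.2).1
                (fun caps => caps ++ pvGetD (pvGetD (pvGetD bcap clp.1 []) bp.1 []) cp.1 [])) cp.1
              else capc) capc)) capb))
        bcf bcf bcap

-- trivial fold
theorem foldl_const {α β : Type} (l : List β) (init : α) :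
    l.foldl (fun s _ => s) init = init := by
  induction l generalizing init with
  | nil => rfl
  | cons x l ih => exact ih init

-- B's per-bias results, named for the proofs
def bLosers (bp : String × List (String × List (String × Int))) : List String :=
  (bp.2.map Prod.fst).filter (fun c => c != (get_max_count bp.2).1)

def bCls (bp : String × List (String × List (String × Int))) : List (String × List (String × Int)) :=
  if (bLosers bp).isEmpty then bp.2
  else [((get_max_count bp.2).1,
         pvSetItem (pvGetD bp.2 (get_max_count bp.2).1 []) "counts"
           ((bp.2.map (fun cp => pvGetD cp.2 "counts" 0)).sum))]

def bCaps (bcap : List (String × List (String × List (String × List String)))) (cl : String)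
    (bp : String × List (String × List (String × Int))) : List (String × List String) :=
  let w := (get_max_count bp.2).1
  let caps := pvGetD (pvGetD bcap cl []) bp.1 []
  (caps.filter (fun kv => !((bLosers bp).contains kv.1))).map
    (fun kv => if kv.1 == w then
        (kv.1, (bLosers bp).foldl (fun mc c => mc ++ pvGetD caps c []) (pvGetD caps w []))
      else kv)

-- B's nested fold unfolded: fresh classes map, captions as conditional per-key updates of bcap
theorem b_row (bcap : List (String × List (String × List (String × List String)))) (cl : String)
    (bs : List (String × List (String × List (String × Int)))) :
    ∀ r : (List (String × List (String × List (String × Int)))) × (List (String × List (String × List (String × List String)))),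
    bs.foldl
      (fun r bp =>
        let winner := (get_max_count bp.2).1
        let losers := (bp.2.map Prod.fst).filter (fun c => c != winner)
        if losers.isEmpty then
          (r.1 ++ [(bp.1, bp.2)], r.2)
        else
          let merged := pvSetItem (pvGetD bp.2 winner []) "counts"
              ((bp.2.map (fun cp => pvGetD cp.2 "counts" 0)).sum)
          let caps := pvGetD (pvGetD bcap cl []) bp.1 []
          let merged_caps := losers.foldl (fun mc c => mc ++ pvGetD caps c []) (pvGetD caps winner [])
          (r.1 ++ [(bp.1, [(winner, merged)])],
           pvSet r.2 cl (fun capb => pvSet capb bp.1 (fun _ =>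
             (caps.filter (fun kv => !(losers.contains kv.1))).map
               (fun kv => if kv.1 == winner then (kv.1, merged_caps) else kv))))) r
    = (r.1 ++ bs.map (fun bp => (bp.1, bCls bp)),
       bs.foldl (fun s2 bp => if (bLosers bp).isEmpty then s2
         else pvSet s2 cl (fun capb => pvSet capb bp.1 (fun _ => bCaps bcap cl bp))) r.2) := by
  induction bs with
  | nil => intro r; simp
  | cons bp bs ih =>
    intro r
    simp only [List.foldl_cons, List.map_cons]
    by_cases hE : (bLosers bp).isEmpty
    · rw [if_pos (by simpa [bLosers] using hE)]
      rw [ih]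
      simp [bCls, hE]
    · rw [if_neg (by simpa [bLosers] using hE)]
      rw [ih]
      rw [if_neg hE]
      refine congrArg₂ Prod.mk ?_ ?_
      · rw [bCls, if_neg hE]
        simp
      · rfl

theorem b_split (bcf : List (String × List (String × List (String × List (String × Int))))) (bcap : List (String × List (String × List (String × List String)))) :
    merge_in_one_cluster_alt bcf bcap
    = (bcf.map (fun clp => (clp.1, clp.2.map (fun bp => (bp.1, bCls bp)))),
       bcf.foldl (fun s clp => clp.2.foldl (fun s2 bp => if (bLosers bp).isEmpty then s2
         else pvSet s2 clp.1 (fun capb => pvSet capb bp.1 (fun _ => bCaps bcap clp.1 bp))) s) bcap) := by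
  rw [merge_in_one_cluster_alt]
  suffices h : ∀ st : (List (String × List (String × List (String × List (String × Int))))) × (List (String × List (String × List (String × List String)))),
      bcf.foldl
        (fun st clp =>
          let inner := clp.2.foldl
            (fun (r : (List (String × List (String × List (String × Int)))) × (List (String × List (String × List (String × List String))))) bp =>
              let winner := (get_max_count bp.2).1
              let losers := (bp.2.map Prod.fst).filter (fun c => c != winner)
              if losers.isEmpty then
                (r.1 ++ [(bp.1, bp.2)], r.2)
              else
                let merged := pvSetItem (pvGetD bp.2 winner []) "counts"
                    ((bp.2.map (fun cp => pvGetD cp.2 "counts" 0)).sum)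
                let caps := pvGetD (pvGetD bcap clp.1 []) bp.1 []
                let merged_caps := losers.foldl (fun mc c => mc ++ pvGetD caps c []) (pvGetD caps winner [])
                (r.1 ++ [(bp.1, [(winner, merged)])],
                 pvSet r.2 clp.1 (fun capb => pvSet capb bp.1 (fun _ =>
                   (caps.filter (fun kv => !(losers.contains kv.1))).map
                     (fun kv => if kv.1 == winner then (kv.1, merged_caps) else kv)))))
            ([], st.2)
          (st.1 ++ [(clp.1, inner.1)], inner.2)) st
      = (st.1 ++ bcf.map (fun clp => (clp.1, clp.2.map (fun bp => (bp.1, bCls bp)))),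
         bcf.foldl (fun s clp => clp.2.foldl (fun s2 bp => if (bLosers bp).isEmpty then s2
           else pvSet s2 clp.1 (fun capb => pvSet capb bp.1 (fun _ => bCaps bcap clp.1 bp))) s) st.2) by
    simpa using h ([], bcap)
  induction bcf with
  | nil => intro st; simp
  | cons clp bcf ih =>
    intro st
    simp only [List.foldl_cons, List.map_cons]
    rw [b_row bcap clp.1 clp.2 ([], st.2)]
    rw [ih]
    simp

-- the two loser-key tests agree
theorem loserkey (w x : String) :
    ∀ classes : List (String × List (String × Int)),
    ((classes.filter (fun c => c.1 != w)).any (fun c => c.1 == x))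
      = (((classes.map Prod.fst).filter (fun c => c != w)).contains x) := by
  intro classes
  induction classes with
  | nil => rfl
  | cons c cs ih =>
    simp only [List.filter_cons, List.map_cons]
    by_cases hc : c.1 = w
    · rw [if_neg (by simp [hc]), if_neg (by simp [hc])]
      exact ih
    · rw [if_pos (by simp [bne_iff_ne, hc]), if_pos (by simp [bne_iff_ne, hc])]
      simp only [List.any_cons, List.contains_cons, ih]
      have : (c.1 == x) = (x == c.1) := by
        by_cases h : c.1 = x <;> simp [h, Ne.symm, eq_comm]
      rw [this]

theorem filter_map_fst (w : String) (classes : List (String × List (String × Int))) :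
    (classes.map Prod.fst).filter (fun c => c != w)
      = (classes.filter (fun c => c.1 != w)).map Prod.fst := by
  induction classes with
  | nil => rfl
  | cons c cs ih =>
    simp only [List.map_cons, List.filter_cons]
    by_cases hc : (c.1 != w) = true
    · rw [if_pos hc, if_pos hc, List.map_cons, ih]
    · rw [if_neg hc, if_neg hc, ih]

-- captions side: A's loser loop over one bias equals B's rebuilt caption dict
theorem caps_core3 (classes : List (String × List (String × Int))) (capc : List (String × List String))
    (hndc : (capc.map (·.1)).Nodup) :
    (classes.foldl
      (fun s cp => if cp.1 ≠ (get_max_count classes).1 then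
          pvDel (pvSet s (get_max_count classes).1
            (fun caps => caps ++ pvGetD capc cp.1 [])) cp.1
        else s) capc)
    = (if ((classes.map Prod.fst).filter (fun c => c != (get_max_count classes).1)).isEmpty then capc
       else ((capc.filter (fun kv => !(((classes.map Prod.fst).filter (fun c => c != (get_max_count classes).1)).contains kv.1))).map
          (fun kv => if kv.1 == (get_max_count classes).1 then
              (kv.1, ((classes.map Prod.fst).filter (fun c => c != (get_max_count classes).1)).foldl
                 (fun mc c => mc ++ pvGetD capc c []) (pvGetD capc (get_max_count classes).1 []))
            else kv))) := by
  by_cases hE : ((classes.map Prod.fst).filter (fun c => c != (get_max_count classes).1)).isEmpty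
  · rw [if_pos hE]
    have hall : ∀ cp ∈ classes, cp.1 = (get_max_count classes).1 := by
      intro cp hcp
      by_contra hne
      have : cp.1 ∈ (classes.map Prod.fst).filter (fun c => c != (get_max_count classes).1) :=
        List.mem_filter.mpr ⟨List.mem_map_of_mem (f := Prod.fst) hcp, by simp [bne_iff_ne, hne]⟩
      rw [List.isEmpty_iff.mp hE] at this
      cases this
    calc _ = classes.foldl (fun (s : List (String × List String)) _ => s) capc :=
          PySem.List.foldl_congr_mem _ _ _ _ (fun s cp hcp => by
            rw [if_neg (by simp [hall cp hcp])])
      _ = capc := foldl_const classes capc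
  · rw [if_neg hE]
    rw [foldl_del_set (get_max_count classes).1 (·.1)
      (fun cp => fun caps => caps ++ pvGetD capc cp.1 []) classes capc]
    have hfeq : capc.filter
          (fun p => !((classes.filter (fun c => c.1 != (get_max_count classes).1)).any (fun c => c.1 == p.1)))
        = capc.filter (fun kv => !(((classes.map Prod.fst).filter (fun c => c != (get_max_count classes).1)).contains kv.1)) := by
      refine List.filter_congr (fun p _ => ?_)
      rw [loserkey]
    rw [hfeq]
    show pvSet _ _ _ = _
    rw [pvSet]
    refine List.map_congr_left (fun kv hkv => ?_)
    by_cases hkw : kv.1 = (get_max_count classes).1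
    · rw [if_pos (by simp [hkw]), if_pos (by simp [hkw])]
      have hkvm : kv ∈ capc := (List.mem_filter.mp hkv).1
      have hval : pvGetD capc (get_max_count classes).1 [] = kv.2 := by
        rw [← hkw]; exact pvGetD_self hndc hkvm []
      rw [hval, filter_map_fst, List.foldl_map]
    · rw [if_neg (by simp [hkw]), if_neg (by simp [hkw])]

theorem preBias_facts (bcap : List (String × List (String × List (String × List String)))) (cl : String)
    (bp : String × List (String × List (String × Int))) (h : preBias bcap cl bp = true) :
    (bp.2.map (·.1)).Nodup ∧
    (∀ cp ∈ bp.2, (cp.2.map (·.1)).Nodup ∧ "counts" ∈ cp.2.map (·.1)) ∧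
    (bp.2 ≠ [] → (∃ cp ∈ bp.2, 0 < pvGetD cp.2 "counts" 0) ∨ "" ∈ bp.2.map (·.1)) := by
  simp only [preBias, Bool.and_eq_true, Bool.or_eq_true] at h
  obtain ⟨⟨⟨h1, h2⟩, h3⟩, _⟩ := h
  refine ⟨of_decide_eq_true h1, ?_, ?_⟩
  · intro cp hcp
    have h2' := List.all_eq_true.mp h2 cp hcp
    simp only [preClass, Bool.and_eq_true] at h2'
    refine ⟨of_decide_eq_true h2'.1, ?_⟩
    obtain ⟨q, hq, hq1⟩ := List.any_eq_true.mp h2'.2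
    simp only [beq_iff_eq] at hq1
    exact hq1 ▸ List.mem_map_of_mem (f := (·.1)) hq
  · intro hne
    rcases h3 with (h3 | h3) | h3
    · exact absurd (List.isEmpty_iff.mp h3) hne
    · left
      obtain ⟨cp, hcp, hdec⟩ := List.any_eq_true.mp h3
      exact ⟨cp, hcp, of_decide_eq_true hdec⟩
    · right
      obtain ⟨cp, hcp, hcp1⟩ := List.any_eq_true.mp h3
      simp only [beq_iff_eq] at hcp1
      exact hcp1 ▸ List.mem_map_of_mem (f := (·.1)) hcp

-- ===== VERDICT (by name: the statement is the Claim_ definition above) =====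
theorem merge_in_one_cluster_spec : Claim_equal_merge_in_one_cluster := by
  intro bcf bcap hdom hpre
  unfold Spec_merge_in_one_cluster
  obtain ⟨h1, h2, h3, h4⟩ := hpre
  have hnd1 : (bcf.map (·.1)).Nodup := of_decide_eq_true (by simpa [pvKeysNodup] using h1)
  have hnd2 : (bcap.map (·.1)).Nodup := of_decide_eq_true (by simpa [pvKeysNodup] using h2)
  have hcapnd : ∀ p ∈ bcap, (p.2.map (·.1)).Nodup ∧ ∀ pb ∈ p.2, (pb.2.map (·.1)).Nodup := by
    intro p hp
    have := List.all_eq_true.mp h3 p hp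
    simp only [Bool.and_eq_true] at this
    exact ⟨of_decide_eq_true (by simpa [pvKeysNodup] using this.1),
      fun pb hpb => of_decide_eq_true (by simpa [pvKeysNodup] using List.all_eq_true.mp this.2 pb hpb)⟩
  have h4' : ∀ p ∈ bcf, (p.2.map (·.1)).Nodup ∧ ∀ bp ∈ p.2, preBias bcap p.1 bp = true := by
    intro p hp
    have := List.all_eq_true.mp h4 p hp
    simp only [Bool.and_eq_true] at this
    exact ⟨of_decide_eq_true (by simpa [pvKeysNodup] using this.1), List.all_eq_true.mp this.2⟩
  rw [a_split, b_split]
  refine Prod.ext ?_ ?_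
  · -- classes component
    rw [foldl_pvSet_map bcf (·.1) _ bcf hnd1]
    refine List.map_congr_left (fun p hp => ?_)
    rw [find?_self hnd1 hp]
    obtain ⟨hndb, hPB⟩ := h4' p hp
    simp only []
    congr 1
    rw [foldl_pvSet_map p.2 (·.1) _ p.2 hndb]
    refine List.map_congr_left (fun bp hbp => ?_)
    rw [find?_self hndb hbp]
    obtain ⟨hc1, hc2, hc3⟩ := preBias_facts bcap p.1 bp (hPB bp hbp)
    simp only []
    congr 1
    by_cases hE : (bLosers bp).isEmpty
    · have hall : ∀ cp ∈ bp.2, cp.1 = (get_max_count bp.2).1 := by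
        intro cp hcp
        by_contra hne
        have : cp.1 ∈ bLosers bp :=
          List.mem_filter.mpr ⟨List.mem_map_of_mem (f := Prod.fst) hcp, by simp [bne_iff_ne, hne]⟩
        rw [List.isEmpty_iff.mp hE] at this
        cases this
      calc _ = bp.2.foldl (fun (s : List (String × List (String × Int))) _ => s) bp.2 :=
            PySem.List.foldl_congr_mem _ _ _ _ (fun s cp hcp => by
              rw [if_neg (by simp [hall cp hcp])])
        _ = bp.2 := foldl_const bp.2 bp.2
        _ = bCls bp := by rw [bCls, if_pos hE]
    · have hne : bp.2 ≠ [] := by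
        intro hnil
        exact hE (by simp [bLosers, hnil])
      rw [classes_core bp.2 hc1 hc2 hc3, if_neg (by simpa using hne)]
      rw [bCls, if_neg hE]
  · -- captions component
    have hBtrans : bcf.foldl (fun s clp => clp.2.foldl (fun s2 bp => if (bLosers bp).isEmpty then s2
           else pvSet s2 clp.1 (fun capb => pvSet capb bp.1 (fun _ => bCaps bcap clp.1 bp))) s) bcap
        = bcf.foldl (fun s clp => pvSet s clp.1 (fun capb =>
            clp.2.foldl (fun capb bp => pvSet capb bp.1 (fun capc =>
              if (bLosers bp).isEmpty then capc else bCaps bcap clp.1 bp)) capb)) bcap := by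
      refine PySem.List.foldl_congr_mem _ _ _ _ (fun s clp _ => ?_)
      calc clp.2.foldl (fun s2 bp => if (bLosers bp).isEmpty then s2
             else pvSet s2 clp.1 (fun capb => pvSet capb bp.1 (fun _ => bCaps bcap clp.1 bp))) s
          = clp.2.foldl (fun s2 bp => pvSet s2 clp.1 (fun capb =>
              if (bLosers bp).isEmpty then capb
              else pvSet capb bp.1 (fun _ => bCaps bcap clp.1 bp))) s := by
            refine PySem.List.foldl_congr_mem _ _ _ _ (fun s2 bp _ => ?_)
            by_cases hE : (bLosers bp).isEmpty <;> simp [hE, pvSet_id]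
        _ = _ := by
            rw [foldl_pvSet_collapse]
            refine congrArg (pvSet s clp.1) (funext fun capb => ?_)
            refine PySem.List.foldl_congr_mem _ _ _ _ (fun cb bp _ => ?_)
            by_cases hE : (bLosers bp).isEmpty <;> simp [hE, pvSet_id]
    rw [hBtrans]
    rw [foldl_pvSet_map bcf (·.1) _ bcap hnd1,
        foldl_pvSet_map bcf (·.1)
          (fun clp capb => clp.2.foldl (fun capb bp => pvSet capb bp.1 (fun capc =>
            if (bLosers bp).isEmpty then capc else bCaps bcap clp.1 bp)) capb) bcap hnd1]
    refine List.map_congr_left (fun p hp => ?_)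
    cases hfind : bcf.find? (fun q => q.1 == p.1) with
    | none => rfl
    | some q =>
      have hq_mem : q ∈ bcf := List.mem_of_find?_eq_some hfind
      have hq_key : q.1 = p.1 := by simpa using List.find?_some hfind
      obtain ⟨hndb, hPB⟩ := h4' q hq_mem
      obtain ⟨hndcapb, hndcapc⟩ := hcapnd p hp
      simp only []
      congr 1
      rw [foldl_pvSet_map q.2 (·.1) _ p.2 hndb,
          foldl_pvSet_map q.2 (·.1)
            (fun bp capc => if (bLosers bp).isEmpty then capc else bCaps bcap q.1 bp) p.2 hndb]
      refine List.map_congr_left (fun pb hpb => ?_)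
      cases hfind2 : q.2.find? (fun r => r.1 == pb.1) with
      | none => rfl
      | some bq =>
        have hbq_mem : bq ∈ q.2 := List.mem_of_find?_eq_some hfind2
        have hbq_key : bq.1 = pb.1 := by simpa using List.find?_some hfind2
        simp only []
        congr 1
        have hcaps : pvGetD (pvGetD bcap q.1 []) bq.1 [] = pb.2 := by
          have e1 : pvGetD bcap q.1 [] = p.2 := by
            rw [hq_key]; exact pvGetD_self hnd2 hp []
          have e2 : pvGetD p.2 bq.1 [] = pb.2 := by
            rw [hbq_key]; exact pvGetD_self hndcapb hpb []
          rw [e1, e2]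
        rw [hcaps]
        rw [caps_core3 bq.2 pb.2 (hndcapc pb hpb)]
        by_cases hE : (bLosers bq).isEmpty
        · rw [if_pos (by simpa [bLosers] using hE), if_pos hE]
        · rw [if_neg (by simpa [bLosers] using hE), if_neg hE]
          rw [bCaps]
          simp only [hcaps, bLosers]
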